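-- pv_equiv track=rewrite | github.com/PatrickJungGermany/Optimizing-Initial-Feature-Mapping-Variables-from-Given-Designs-via-Tracking | scripts/optimize.py | find_best_grid
-- ===== SOURCE A (Python) =====
-- import math
--
-- def find_best_grid(num_crosses: int) -> tuple[int, int]:
--     """
--     Find near-square (rows, cols) tiling for a requested number of cross blocks.
--
--     Parameters
--     ----------
--     num_crosses : int
--
--     Returns
--     -------
--     rows, cols : tuple[int,int]
--     """
--     best_rows, best_cols = None, None
--     min_diff = float('inf')
--
--     for rows in range(1, num_crosses + 1):
--         cols = math.ceil(num_crosses / rows)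
--         diff = abs(rows - cols)
--
--         if rows * cols >= num_crosses and diff < min_diff:
--             best_rows, best_cols = rows, cols
--             min_diff = diff
--
--     return best_rows, best_cols
-- ===== SOURCE B (Python) =====
-- import math
--
-- def find_best_grid(num_crosses: int) -> tuple[int, int]:
--     """O(1): the diff |rows - ceil(n/rows)| strictly decreases up to
--     s = ceil(sqrt(n)) and strictly increases from s on, so only rows
--     s-1 and s can be optimal; A keeps the first (smallest) minimizer."""
--     s = math.isqrt(num_crosses)
--     if s * s < num_crosses:
--         s += 1
--     best = None
--     for rows in (s - 1, s):
--         if rows < 1: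
--             continue
--         cols = -(-num_crosses // rows)
--         d = abs(rows - cols)
--         if best is None or d < best[0]:
--             best = (d, rows, cols)
--     return best[1], best[2]
-- ===== Notes on version B (the rewrite author's own statement) =====
-- stated objective: faster
-- what changed: Instead of scanning all rows 1..n, B evaluates only the two candidates ceil(sqrt(n))-1 and ceil(sqrt(n)), using the fact that |rows - ceil(n/rows)| is strictly decreasing before ceil(sqrt(n)) and strictly increasing after it.
-- outside the precondition, e.g. on find_best_grid(0): A returns (None, None), B raises TypeError; on find_best_grid(-1): A returns (None, None), B raises ValueError
import Mathlib
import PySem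

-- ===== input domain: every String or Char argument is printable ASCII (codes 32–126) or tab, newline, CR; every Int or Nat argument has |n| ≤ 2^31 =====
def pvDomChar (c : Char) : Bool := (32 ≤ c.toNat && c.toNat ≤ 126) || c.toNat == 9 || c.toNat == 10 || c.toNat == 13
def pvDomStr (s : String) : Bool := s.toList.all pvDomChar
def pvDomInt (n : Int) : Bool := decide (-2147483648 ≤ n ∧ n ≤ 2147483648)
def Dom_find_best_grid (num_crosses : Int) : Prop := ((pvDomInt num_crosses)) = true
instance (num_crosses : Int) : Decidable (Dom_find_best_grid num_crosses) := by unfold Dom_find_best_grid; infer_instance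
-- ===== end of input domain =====

-- B replaces A's scan of all rows 1..n by the two candidate row counts ceil(sqrt(n))-1 and
-- ceil(sqrt(n)); equivalence of RETURN VALUES is proved for num_crosses ≥ 1 (Pre_).

-- ===== PORT A =====
-- Loop body of A: state = (best_rows, best_cols, min_diff); `none` is the initial
-- (None, None, inf) state, in which `diff < min_diff` is vacuously true.
-- math.ceil(num_crosses / rows) is ported as the exact integer ceiling
-- -((-num_crosses) // rows): exact on the domain |num_crosses| ≤ 2^31 < 2^52,
-- where float division cannot round across an integer.
def stepA (n : Int) (acc : Option (Int × Int × Int)) (rows : Int) : Option (Int × Int × Int) :=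
  let cols := -(PySem.Int.floordiv (-n) rows)
  let diff := |rows - cols|
  match acc with
  | none => if n ≤ rows * cols then some (rows, cols, diff) else none
  | some (br, bc, md) =>
      if n ≤ rows * cols ∧ diff < md then some (rows, cols, diff) else some (br, bc, md)

def find_best_grid (num_crosses : Int) : Int × Int :=
  match (PySem.List.pyRange 1 (num_crosses + 1) 1).foldl (stepA num_crosses) none with
  | some (br, bc, _) => (br, bc)
  | none => (0, 0)   -- Python returns (None, None) here (only when num_crosses ≤ 0); excluded by Pre_

-- ===== PORT B =====
def find_best_grid_alt (num_crosses : Int) : Int × Int :=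
  let s0 : Int := (Nat.sqrt num_crosses.toNat : Int)   -- math.isqrt (raises for num_crosses < 0; outside Pre_)
  let s : Int := if s0 * s0 < num_crosses then s0 + 1 else s0
  let best := [s - 1, s].foldl
    (fun (acc : Option (Int × Int × Int)) rows =>
      if rows < 1 then acc
      else
        let cols := -(PySem.Int.floordiv (-num_crosses) rows)
        let d := |rows - cols|
        match acc with
        | none => some (d, rows, cols)
        | some (d0, r0, c0) => if d < d0 then some (d, rows, cols) else some (d0, r0, c0))
    none
  match best with
  | some (_, r, c) => (r, c)
  | none => (0, 0)   -- Python raises TypeError here (only when num_crosses ≤ 0); outside Pre_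

-- ===== PRECONDITION & SPEC =====
-- Pre_ excludes num_crosses ≤ 0: there A's loop never runs and it returns (None, None),
-- which is not a value of the declared tuple[int,int] type.
def Pre_find_best_grid (num_crosses : Int) : Prop := 1 ≤ num_crosses
instance (num_crosses : Int) : Decidable (Pre_find_best_grid num_crosses) := by
  unfold Pre_find_best_grid; infer_instance

def pvWitness_find_best_grid : Int := 7

def Spec_find_best_grid (num_crosses : Int) (out : Int × Int) : Prop := out = find_best_grid_alt num_crosses
instance (num_crosses : Int) (out : Int × Int) : Decidable (Spec_find_best_grid num_crosses out) := by
  unfold Spec_find_best_grid; infer_instance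

-- ===== CLAIM (what is proved, stated in full; the proofs are below) =====
def Claim_equal_find_best_grid : Prop := ∀ (num_crosses : Int), Dom_find_best_grid num_crosses → Pre_find_best_grid num_crosses → Spec_find_best_grid num_crosses (find_best_grid num_crosses)

-- ===== LEMMAS AND PROOFS =====

-- proof-side names: pvC n r = ceil(n/r), pvF n r = |r - pvC n r|,
-- pvS n = ceil(sqrt(n)), pvM n = the row count both programs return.
def pvC (n r : Int) : Int := -(PySem.Int.floordiv (-n) r)
def pvF (n r : Int) : Int := |r - pvC n r|
def pvS (n : Int) : Int :=
  if (Nat.sqrt n.toNat : Int) * (Nat.sqrt n.toNat : Int) < n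
  then (Nat.sqrt n.toNat : Int) + 1 else (Nat.sqrt n.toNat : Int)
def pvM (n : Int) : Int :=
  if 2 ≤ pvS n ∧ pvF n (pvS n - 1) ≤ pvF n (pvS n) then pvS n - 1 else pvS n

-- A's loop body, re-expressed through the proof-side names (definitional)
lemma stepA_eq (n : Int) (acc : Option (Int × Int × Int)) (rows : Int) :
    stepA n acc rows =
      match acc with
      | none => if n ≤ rows * pvC n rows then some (rows, pvC n rows, pvF n rows) else none
      | some (br, bc, md) =>
          if n ≤ rows * pvC n rows ∧ pvF n rows < md
          then some (rows, pvC n rows, pvF n rows) else some (br, bc, md) := rfl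

lemma pvC_bounds (n r : Int) (hr : 0 < r) : (pvC n r - 1) * r < n ∧ n ≤ pvC n r * r :=
  (PySem.Int.neg_floordiv_neg_eq_iff_of_pos hr).mp rfl

lemma pvC_pos (n r : Int) (hn : 1 ≤ n) (hr : 0 < r) : 1 ≤ pvC n r := by
  have h := pvC_bounds n r hr
  nlinarith [h.2]

lemma pvC_antitone (n r : Int) (hn : 1 ≤ n) (hr : 0 < r) : pvC n (r + 1) ≤ pvC n r := by
  have h1 := pvC_bounds n r hr
  have h2 := pvC_bounds n (r + 1) (by omega)
  have hp := pvC_pos n r hn hr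
  by_contra h
  have h' : pvC n r + 1 ≤ pvC n (r + 1) := by omega
  nlinarith [h1.2, h2.1]

lemma pvC_gt (n r : Int) (hr : 0 < r) (h : r * r < n) : r < pvC n r := by
  have h1 := pvC_bounds n r hr
  by_contra hc
  have hc' : pvC n r ≤ r := by omega
  nlinarith [h1.2]

lemma pvC_le (n r : Int) (hr : 0 < r) (h : n ≤ r * r) : pvC n r ≤ r := by
  have h1 := pvC_bounds n r hr
  by_contra hc
  have hc' : r + 1 ≤ pvC n r := by omega
  nlinarith [h1.1]

lemma pvS_spec (n : Int) (hn : 1 ≤ n) :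
    1 ≤ pvS n ∧ (pvS n - 1) * (pvS n - 1) < n ∧ n ≤ pvS n * pvS n := by
  have hnn : (0 : Int) ≤ n := by omega
  have hs0 : (0 : Int) ≤ (Nat.sqrt n.toNat : Int) := Int.natCast_nonneg _
  have hcast : (n.toNat : Int) = n := Int.toNat_of_nonneg hnn
  have h1 : (Nat.sqrt n.toNat : Int) * (Nat.sqrt n.toNat : Int) ≤ n := by
    have h := Nat.sqrt_le' n.toNat
    have h' := (Nat.cast_le (α := Int)).mpr h
    push_cast at h'
    nlinarith [h']
  have h2 : n < ((Nat.sqrt n.toNat : Int) + 1) * ((Nat.sqrt n.toNat : Int) + 1) := by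
    have h := Nat.lt_succ_sqrt' n.toNat
    have h' := (Nat.cast_lt (α := Int)).mpr h
    push_cast at h'
    nlinarith [h']
  unfold pvS
  split
  · rename_i h
    refine ⟨by omega, ?_, ?_⟩
    · have he : ((Nat.sqrt n.toNat : Int) + 1 - 1) * ((Nat.sqrt n.toNat : Int) + 1 - 1)
          = (Nat.sqrt n.toNat : Int) * (Nat.sqrt n.toNat : Int) := by ring
      omega
    · nlinarith [h2]
  · rename_i h
    have h' : n ≤ (Nat.sqrt n.toNat : Int) * (Nat.sqrt n.toNat : Int) := by omega
    have heq : (Nat.sqrt n.toNat : Int) * (Nat.sqrt n.toNat : Int) = n := le_antisymm h1 h'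
    have hpos : 1 ≤ (Nat.sqrt n.toNat : Int) := by nlinarith
    refine ⟨hpos, ?_, by omega⟩
    nlinarith

lemma pvF_low (n r : Int) (h : r ≤ pvC n r) : pvF n r = pvC n r - r := by
  unfold pvF
  rw [abs_of_nonpos (by omega)]
  ring

lemma pvF_high (n r : Int) (h : pvC n r ≤ r) : pvF n r = r - pvC n r := by
  unfold pvF
  rw [abs_of_nonneg (by omega)]

-- strict decrease of pvF below pvS
lemma pvF_dec (n r : Int) (hn : 1 ≤ n) (hr : 1 ≤ r) (h : (r + 1) * (r + 1) < n) :
    pvF n (r + 1) < pvF n r := by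
  have hgt1 : r < pvC n r := pvC_gt n r (by omega) (by nlinarith)
  have hgt2 : r + 1 < pvC n (r + 1) := pvC_gt n (r + 1) (by omega) h
  have hanti := pvC_antitone n r hn (by omega)
  rw [pvF_low n r (by omega), pvF_low n (r + 1) (by omega)]
  omega

-- strict increase of pvF from pvS on
lemma pvF_inc (n r : Int) (hn : 1 ≤ n) (h : pvS n ≤ r) : pvF n r < pvF n (r + 1) := by
  obtain ⟨hs1, _, hs3⟩ := pvS_spec n hn
  have hr1 : 1 ≤ r := le_trans hs1 h
  have hle1 : pvC n r ≤ r := pvC_le n r (by omega) (by nlinarith)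
  have hle2 : pvC n (r + 1) ≤ r + 1 := pvC_le n (r + 1) (by omega) (by nlinarith)
  have hanti := pvC_antitone n r hn (by omega)
  rw [pvF_high n r hle1, pvF_high n (r + 1) hle2]
  omega

lemma pvF_mono (n : Int) (hn : 1 ≤ n) :
    ∀ r, pvS n ≤ r → pvS n < r → pvF n (pvS n) < pvF n r := by
  intro r hr
  induction r, hr using Int.le_induction with
  | base => intro h; omega
  | succ k hk ih =>
      intro _
      rcases lt_trichotomy (pvS n) k with h | h | h
      · exact lt_trans (ih h) (pvF_inc n k hn hk)
      · subst h
        exact pvF_inc n (pvS n) hn le_rfl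
      · omega

lemma pvM_le (n : Int) : pvF n (pvM n) ≤ pvF n (pvS n) := by
  unfold pvM
  split
  · rename_i h; exact h.2
  · exact le_rfl

-- the invariant of A's fold: after rows = 1..k the state is the first minimizer so far
lemma foldA_inv (n : Int) (hn : 1 ≤ n) :
    ∀ (k : Int), 1 ≤ k → k ≤ n →
      (PySem.List.pyRange 1 (k + 1) 1).foldl (stepA n) none =
        some (if k ≤ pvS n - 1 then k else pvM n,
              pvC n (if k ≤ pvS n - 1 then k else pvM n),
              pvF n (if k ≤ pvS n - 1 then k else pvM n)) := by
  intro k hk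
  induction k, hk using Int.le_induction with
  | base =>
      intro _
      rw [PySem.List.pyRange_one_singleton]
      have hb := pvC_bounds n 1 (by omega)
      have hG1 : (if (1 : Int) ≤ pvS n - 1 then (1 : Int) else pvM n) = 1 := by
        split
        · rfl
        · rename_i h
          obtain ⟨hs1, hs2, hs3⟩ := pvS_spec n hn
          have hs : pvS n = 1 := by omega
          unfold pvM
          rw [hs]
          norm_num
      rw [hG1]
      simp only [List.foldl, stepA_eq]
      rw [if_pos (by omega : n ≤ 1 * pvC n 1)]
  | succ k hk ih =>
      intro hkn
      have ihh := ih (by omega)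
      rw [PySem.List.pyRange_one_succ_right (by omega), List.foldl_append, ihh]
      simp only [List.foldl, stepA_eq]
      obtain ⟨hs1, hs2, hs3⟩ := pvS_spec n hn
      have hb := pvC_bounds n (k + 1) (by omega)
      have hcond : n ≤ (k + 1) * pvC n (k + 1) := by
        have := mul_comm (pvC n (k + 1)) (k + 1)
        linarith [hb.2]
      rcases lt_trichotomy (k + 1) (pvS n) with hlt | heq | hgt
      · -- k+1 ≤ pvS n - 1 : still in the strictly decreasing region, always update
        have hk1 : k ≤ pvS n - 1 := by omega
        have hk2 : k + 1 ≤ pvS n - 1 := by omega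
        rw [if_pos hk1, if_pos hk2]
        have hdec : pvF n (k + 1) < pvF n k := by
          apply pvF_dec n k hn hk
          nlinarith [hs2]
        rw [if_pos ⟨hcond, hdec⟩]
      · -- k + 1 = pvS n : the comparison at pvS n decides pvM
        have hk1 : k ≤ pvS n - 1 := by omega
        have hk2 : ¬ (k + 1 ≤ pvS n - 1) := by omega
        rw [if_pos hk1, if_neg hk2]
        have hks : k = pvS n - 1 := by omega
        by_cases hcmp : pvF n (k + 1) < pvF n k
        · rw [if_pos ⟨hcond, hcmp⟩]
          have hm : pvM n = pvS n := by
            unfold pvM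
            rw [if_neg]
            rintro ⟨-, hle⟩
            rw [← hks, ← heq] at hle
            omega
          rw [hm, ← heq]
        · rw [if_neg (by rintro ⟨-, hlt⟩; exact hcmp hlt)]
          have hm : pvM n = pvS n - 1 := by
            unfold pvM
            rw [if_pos]
            refine ⟨by omega, ?_⟩
            rw [← hks, ← heq]
            omega
          rw [hm, ← hks]
      · -- k + 1 > pvS n : nothing beats the stored first minimizer pvM n
        have hk1 : ¬ (k ≤ pvS n - 1) := by omega
        have hk2 : ¬ (k + 1 ≤ pvS n - 1) := by omega
        rw [if_neg hk1, if_neg hk2]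
        rw [if_neg]
        rintro ⟨-, hlt⟩
        have h1 : pvF n (pvS n) < pvF n (k + 1) :=
          pvF_mono n hn (k + 1) (by omega) (by omega)
        have h2 := pvM_le n
        omega

lemma findA_eq (n : Int) (hn : 1 ≤ n) : find_best_grid n = (pvM n, pvC n (pvM n)) := by
  obtain ⟨hs1, hs2, hs3⟩ := pvS_spec n hn
  have hns : ¬ (n ≤ pvS n - 1) := by
    intro h
    nlinarith
  have h := foldA_inv n hn n hn le_rfl
  rw [if_neg hns] at h
  unfold find_best_grid
  rw [h]

lemma findB_eq (n : Int) (hn : 1 ≤ n) : find_best_grid_alt n = (pvM n, pvC n (pvM n)) := by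
  obtain ⟨hs1, hs2, hs3⟩ := pvS_spec n hn
  have hB : find_best_grid_alt n =
      (match [pvS n - 1, pvS n].foldl
        (fun (acc : Option (Int × Int × Int)) rows =>
          if rows < 1 then acc
          else
            match acc with
            | none => some (pvF n rows, rows, pvC n rows)
            | some (d0, r0, c0) =>
                if pvF n rows < d0 then some (pvF n rows, rows, pvC n rows) else some (d0, r0, c0))
        none with
      | some (_, r, c) => (r, c)
      | none => (0, 0)) := rfl
  rw [hB]
  simp only [List.foldl]
  rcases eq_or_lt_of_le hs1 with h1 | h2
  · -- pvS n = 1 : the first candidate (0) is skipped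
    have hm : pvM n = pvS n := by
      unfold pvM
      rw [if_neg]
      rintro ⟨h, -⟩
      omega
    rw [if_pos (show pvS n - 1 < 1 by omega), if_neg (show ¬ pvS n < 1 by omega), hm]
  · -- pvS n ≥ 2 : both candidates are evaluated
    rw [if_neg (show ¬ pvS n - 1 < 1 by omega), if_neg (show ¬ pvS n < 1 by omega)]
    dsimp only
    by_cases hcmp : pvF n (pvS n) < pvF n (pvS n - 1)
    · rw [if_pos hcmp]
      have hm : pvM n = pvS n := by
        unfold pvM
        rw [if_neg]
        rintro ⟨-, hle⟩
        omega
      rw [hm]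
    · rw [if_neg hcmp]
      have hm : pvM n = pvS n - 1 := by
        unfold pvM
        rw [if_pos ⟨by omega, by omega⟩]
      rw [hm]

-- ===== VERDICT (by name: the statement is the Claim_ definition above) =====
theorem find_best_grid_spec : Claim_equal_find_best_grid := by
  intro n _ hpre
  unfold Spec_find_best_grid
  rw [findA_eq n hpre, findB_eq n hpre]
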